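-- pv_equiv track=rewrite | github.com/strobi-bunni/MyPythonPractice | problem_solving/eight_queens.py | is_same_square_array
-- ===== SOURCE A (Python) =====
-- import math
-- from collections.abc import Iterator, Sequence
-- from typing import TypeVar
--
-- T = TypeVar('T')
--
-- def reorder(seq: Sequence[T], order: Sequence[int]) -> list[T]:
--     if len(seq) != len(order):
--         raise IndexError
--     return [seq[i] for i in order]
--
-- def is_same_square_array(seq: Sequence[T], seq2: Sequence[T]) -> int:
--     size = math.isqrt(len(seq))
--     if (
--             seq == seq2 or
--             (seq == reorder(seq2, [i * size + j for i in range(size - 1, -1, -1) for j in range(size)])) or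
--             (seq == reorder(seq2, [i * size + j for i in range(size) for j in range(size - 1, -1, -1)])) or
--             (seq == reorder(seq2, [i * size + j for i in range(size - 1, -1, -1) for j in range(size - 1, -1, -1)])) or
--             (seq == reorder(seq2, [j * size + i for i in range(size) for j in range(size)])) or
--             (seq == reorder(seq2, [j * size + i for i in range(size - 1, -1, -1) for j in range(size)])) or
--             (seq == reorder(seq2, [j * size + i for i in range(size) for j in range(size - 1, -1, -1)])) or
--             (seq == reorder(seq2, [j * size + i for i in range(size - 1, -1, -1) for j in range(size - 1, -1, -1)]))
--     ):
--         return 0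
--     else:
--         return -1
-- ===== SOURCE B (Python) =====
-- import math
--
--
-- def is_same_square_array(seq, seq2):
--     if seq == seq2:
--         return 0
--     size = math.isqrt(len(seq))
--     if len(seq2) != size * size:
--         raise IndexError
--     if len(seq) != size * size:
--         return -1
--     r = size - 1
--
--     def idx(t, i, j):
--         if t == 0:
--             return (r - i) * size + j
--         if t == 1:
--             return i * size + (r - j)
--         if t == 2:
--             return (r - i) * size + (r - j)
--         if t == 3:
--             return j * size + i
--         if t == 4:
--             return j * size + (r - i)
--         if t == 5:
--             return (r - j) * size + i
--         return (r - j) * size + (r - i)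
--
--     # candidate elimination: one pass over positions, pruning the set of
--     # still-possible symmetries instead of materialising any transform
--     alive = [0, 1, 2, 3, 4, 5, 6]
--     for k in range(size * size):
--         i, j = divmod(k, size)
--         v = seq[k]
--         alive = [t for t in alive if seq2[idx(t, i, j)] == v]
--         if not alive:
--             return -1
--     return 0
-- ===== Notes on version B (the rewrite author's own statement) =====
-- stated objective: alternative
-- what changed: Instead of materialising the seven reordered copies of seq2 and comparing whole lists, B makes a single pass over the grid positions and prunes a running set of still-possible symmetries by elementwise candidate elimination, with early exit once the set empties; no transform is ever built.
import Mathlib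
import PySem

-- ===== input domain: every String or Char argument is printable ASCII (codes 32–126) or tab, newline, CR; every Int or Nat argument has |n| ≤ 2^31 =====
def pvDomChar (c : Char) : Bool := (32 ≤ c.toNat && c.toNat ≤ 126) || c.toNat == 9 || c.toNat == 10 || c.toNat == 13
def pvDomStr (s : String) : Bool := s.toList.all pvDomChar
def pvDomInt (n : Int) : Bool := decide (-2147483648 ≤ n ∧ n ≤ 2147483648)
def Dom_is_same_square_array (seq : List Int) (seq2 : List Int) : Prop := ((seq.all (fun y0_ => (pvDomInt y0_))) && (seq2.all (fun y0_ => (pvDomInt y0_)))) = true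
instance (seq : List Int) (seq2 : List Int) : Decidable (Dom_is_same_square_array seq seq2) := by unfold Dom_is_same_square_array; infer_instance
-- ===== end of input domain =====

-- B replaces the eight materialised reorderings by a single pass over the grid that
-- prunes a running set of still-possible symmetries (candidate elimination with early
-- exit); objective: alternative algorithm of the same cost.

-- ===== PORT A =====
-- math.isqrt(n): the largest k with k*k ≤ n (kernel-reducible; shared by both ports,
-- as both Pythons call the same library function).
def pvIsqrt (n : Nat) : Nat :=
  (List.range (n + 1)).foldl (fun acc k => if k * k ≤ n then k else acc) 0

-- Python 'reorder': none exactly where it raises IndexError (length mismatch).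
-- At A's call sites every index in 'order' lies in [0, len(order)), so when the length
-- check passes '(pyGet? …).getD 0' never takes the default and is exact.
def pyReorder? (s : List Int) (order : List Int) : Option (List Int) :=
  if s.length ≠ order.length then none
  else some (order.map (fun i => (PySem.List.pyGet? s i).getD 0))

-- math.isqrt(len(seq)) = Nat.sqrt of the length (the argument is a length, hence ≥ 0).
-- Where Python A raises IndexError (seq ≠ seq2 and len(seq2) ≠ size²) every pyReorder? is
-- none, the comparisons are all false and the port returns -1; Pre_ excludes those inputs.
def is_same_square_array (seq : List Int) (seq2 : List Int) : Int :=
  let size : Int := ((pvIsqrt seq.length : Nat) : Int)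
  if seq = seq2 ∨
      some seq = pyReorder? seq2 ((PySem.List.pyRange (size - 1) (-1) (-1)).flatMap
        (fun i => (PySem.List.pyRange 0 size 1).map (fun j => i * size + j))) ∨
      some seq = pyReorder? seq2 ((PySem.List.pyRange 0 size 1).flatMap
        (fun i => (PySem.List.pyRange (size - 1) (-1) (-1)).map (fun j => i * size + j))) ∨
      some seq = pyReorder? seq2 ((PySem.List.pyRange (size - 1) (-1) (-1)).flatMap
        (fun i => (PySem.List.pyRange (size - 1) (-1) (-1)).map (fun j => i * size + j))) ∨
      some seq = pyReorder? seq2 ((PySem.List.pyRange 0 size 1).flatMap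
        (fun i => (PySem.List.pyRange 0 size 1).map (fun j => j * size + i))) ∨
      some seq = pyReorder? seq2 ((PySem.List.pyRange (size - 1) (-1) (-1)).flatMap
        (fun i => (PySem.List.pyRange 0 size 1).map (fun j => j * size + i))) ∨
      some seq = pyReorder? seq2 ((PySem.List.pyRange 0 size 1).flatMap
        (fun i => (PySem.List.pyRange (size - 1) (-1) (-1)).map (fun j => j * size + i))) ∨
      some seq = pyReorder? seq2 ((PySem.List.pyRange (size - 1) (-1) (-1)).flatMap
        (fun i => (PySem.List.pyRange (size - 1) (-1) (-1)).map (fun j => j * size + i)))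
  then 0 else -1

-- ===== PORT B =====
-- Python helper idx(t, i, j): the position in seq2 that symmetry t maps grid cell (i,j) to.
def bMap (size r t i j : Nat) : Nat :=
  if t = 0 then (r - i) * size + j
  else if t = 1 then i * size + (r - j)
  else if t = 2 then (r - i) * size + (r - j)
  else if t = 3 then j * size + i
  else if t = 4 then j * size + (r - i)
  else if t = 5 then (r - j) * size + i
  else (r - j) * size + (r - i)

-- Python B's 'for k in range(size*size)' loop over positions, pruning 'alive'.
-- All indexing is in range at the call site (k < size² = len(seq), idx < size² = len(seq2)),
-- so 'getD _ 0' never takes the default and is exact.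
def bLoop (seq seq2 : List Int) (size : Nat) : List Nat → List Nat → Int
  | _alive, [] => 0
  | alive, k :: rest =>
    let i := k / size
    let j := k % size
    let v := seq.getD k 0
    let alive' := alive.filter (fun t => seq2.getD (bMap size (size - 1) t i j) 0 == v)
    if alive' = [] then -1 else bLoop seq seq2 size alive' rest

-- Python B raises IndexError where the length check fails (as A does there); Pre_
-- excludes those inputs and the port returns -1 there.
def is_same_square_array_alt (seq : List Int) (seq2 : List Int) : Int :=
  if seq = seq2 then 0
  else
    let size := pvIsqrt seq.length
    if seq2.length ≠ size * size then -1
    else if seq.length ≠ size * size then -1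
    else bLoop seq seq2 size [0, 1, 2, 3, 4, 5, 6] (List.range (size * size))

-- ===== PRECONDITION & SPEC =====
-- Pre_ excludes exactly the inputs where Python A raises IndexError in 'reorder':
-- seq ≠ seq2 and len(seq2) ≠ isqrt(len(seq))² (Python B raises there too).
def Pre_is_same_square_array (seq : List Int) (seq2 : List Int) : Prop :=
  seq = seq2 ∨ seq2.length = pvIsqrt seq.length * pvIsqrt seq.length
instance (seq : List Int) (seq2 : List Int) : Decidable (Pre_is_same_square_array seq seq2) := by
  unfold Pre_is_same_square_array; infer_instance

def pvWitness_is_same_square_array : List Int × List Int := ([1, 2, 3, 4], [3, 1, 4, 2])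

def Spec_is_same_square_array (seq : List Int) (seq2 : List Int) (out : Int) : Prop := out = is_same_square_array_alt seq seq2
instance (seq : List Int) (seq2 : List Int) (out : Int) : Decidable (Spec_is_same_square_array seq seq2 out) := by unfold Spec_is_same_square_array; infer_instance

-- ===== CLAIM (what is proved, stated in full; the proofs are below) =====
def Claim_equal_is_same_square_array : Prop := ∀ (seq : List Int) (seq2 : List Int), Dom_is_same_square_array seq seq2 → Pre_is_same_square_array seq seq2 → Spec_is_same_square_array seq seq2 (is_same_square_array seq seq2)

-- ===== LEMMAS AND PROOFS =====

-- pvIsqrt computes Nat.sqrt: the fold keeps the last (= largest) k in range(n+1) with k² ≤ n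
theorem pvIsqrt_aux (n : Nat) : ∀ m : Nat, Nat.sqrt n < m →
    (List.range m).foldl (fun acc k => if k * k ≤ n then k else acc) 0 = Nat.sqrt n := by
  intro m
  induction m with
  | zero => omega
  | succ m ih =>
    intro hm
    rw [List.range_succ, List.foldl_append, List.foldl_cons, List.foldl_nil]
    rcases Nat.lt_or_ge (Nat.sqrt n) m with h | h
    · have hlt : n < m * m := by
        have := Nat.sqrt_lt'.mp h
        rwa [Nat.pow_two] at this
      rw [ih h, if_neg (Nat.not_le.mpr hlt)]
    · have hm' : m = Nat.sqrt n := by omega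
      rw [hm', if_pos (Nat.sqrt_le n)]

theorem pvIsqrt_eq (n : Nat) : pvIsqrt n = Nat.sqrt n := by
  rw [pvIsqrt]
  exact pvIsqrt_aux n (n + 1) (by have := Nat.sqrt_le_self n; omega)

-- canonical form both sides are reduced to: entry (i,j) of the result is seq2[e i j]
def pvCanon (seq2 : List Int) (s : Nat) (e : Nat → Nat → Nat) : List Int :=
  (List.range s).flatMap (fun i => (List.range s).map (fun j => seq2.getD (e i j) 0))

theorem pvReorder_eval (seq2 : List Int) (s : Nat) (h2 : seq2.length = s * s)
    (gi gj : Nat → Nat) (hgi : ∀ k, k < s → gi k < s) (hgj : ∀ k, k < s → gj k < s)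
    (F : Int → Int → Int) (G : Nat → Nat → Nat)
    (hFG : ∀ i j : Nat, i < s → j < s → F (i : Int) (j : Int) = ((G i j : Nat) : Int)) :
    pyReorder? seq2 (((List.range s).map (fun k => ((gi k : Nat) : Int))).flatMap
      (fun i => ((List.range s).map (fun k => ((gj k : Nat) : Int))).map (fun j => F i j)))
    = some (pvCanon seq2 s (fun i j => G (gi i) (gj j))) := by
  have hlen : (((List.range s).map (fun k => ((gi k : Nat) : Int))).flatMap
      (fun i => ((List.range s).map (fun k => ((gj k : Nat) : Int))).map (fun j => F i j))).length = s * s := by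
    simp [List.length_flatMap, List.map_map, Function.comp_def]
  rw [pyReorder?, if_neg (by rw [hlen, h2]; simp)]
  congr 1
  rw [List.map_flatMap, pvCanon, List.flatMap_map]
  apply List.flatMap_congr
  intro i hi
  simp only [List.mem_range] at hi
  rw [List.map_map, List.map_map]
  apply List.map_congr_left
  intro j hj
  simp only [List.mem_range] at hj
  simp only [Function.comp_def]
  rw [hFG (gi i) (gj j) (hgi i hi) (hgj j hj), PySem.List.pyGet?_natCast,
    List.getD_eq_getElem?_getD]

-- flatten a row-major double range into a single range with div/mod coordinates
theorem pvFlatMap_range_mul {α : Type} (n m : Nat) (g : Nat → α) :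
    (List.range n).flatMap (fun i => (List.range m).map (fun j => g (i * m + j)))
      = (List.range (n * m)).map g := by
  induction n with
  | zero => simp
  | succ n ih =>
    rw [List.range_succ, List.flatMap_append, ih, Nat.succ_mul, List.range_add,
      List.map_append, List.map_map]
    simp [Function.comp_def, Nat.add_comm]

-- pvCanon as a map over the flat position range
theorem pvCanon_eq_map (seq2 : List Int) (s : Nat) (e : Nat → Nat → Nat) :
    pvCanon seq2 s e = (List.range (s * s)).map (fun k => seq2.getD (e (k / s) (k % s)) 0) := by
  rw [pvCanon, ← pvFlatMap_range_mul s s (fun k => seq2.getD (e (k / s) (k % s)) 0)]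
  apply List.flatMap_congr
  intro i hi
  simp only [List.mem_range] at hi
  apply List.map_congr_left
  intro j hj
  simp only [List.mem_range] at hj
  have hd : (i * s + j) / s = i := by
    rw [Nat.mul_comm i s, Nat.mul_add_div (by omega), Nat.div_eq_of_lt hj, Nat.add_zero]
  have hm : (i * s + j) % s = j := by
    rw [Nat.mul_comm i s, Nat.mul_add_mod]; exact Nat.mod_eq_of_lt hj
  rw [hd, hm]

-- the survivors after the whole loop are the filter by the conjunction of all conditions
theorem pvBLoop_eval (seq seq2 : List Int) (s : Nat) :
    ∀ (ks : List Nat) (alive : List Nat), alive ≠ [] →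
    bLoop seq seq2 s alive ks =
      if alive.filter (fun t => ks.all
          (fun k => seq2.getD (bMap s (s - 1) t (k / s) (k % s)) 0 == seq.getD k 0)) = []
      then -1 else 0 := by
  intro ks
  induction ks with
  | nil =>
    intro alive ha
    simp [bLoop, List.filter_eq_self.mpr (fun _ _ => rfl), ha]
  | cons k rest ih =>
    intro alive ha
    have hsplit : alive.filter (fun t => (k :: rest).all
        (fun k' => seq2.getD (bMap s (s - 1) t (k' / s) (k' % s)) 0 == seq.getD k' 0))
        = (alive.filter (fun t => seq2.getD (bMap s (s - 1) t (k / s) (k % s)) 0 == seq.getD k 0)).filter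
          (fun t => rest.all (fun k' => seq2.getD (bMap s (s - 1) t (k' / s) (k' % s)) 0 == seq.getD k' 0)) := by
      rw [List.filter_filter]
      apply List.filter_congr
      intro t _
      simp [List.all_cons, Bool.and_comm]
    rw [bLoop, hsplit]
    by_cases hempty : alive.filter (fun t => seq2.getD (bMap s (s - 1) t (k / s) (k % s)) 0 == seq.getD k 0) = []
    · rw [if_pos hempty, hempty, List.filter_nil, if_pos rfl]
    · rw [if_neg hempty, ih _ hempty]

-- pointwise agreement on all positions ↔ seq equals the canonical transform
theorem pvAll_iff_canon (seq seq2 : List Int) (s : Nat) (hl : seq.length = s * s)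
    (e : Nat → Nat → Nat) :
    ((List.range (s * s)).all
        (fun k => seq2.getD (e (k / s) (k % s)) 0 == seq.getD k 0)) = true
      ↔ seq = pvCanon seq2 s e := by
  rw [pvCanon_eq_map]
  constructor
  · intro h
    apply List.ext_getElem (by simp [hl])
    intro k h1 h2
    have hk : k < s * s := by simpa [hl] using h1
    have hc := (List.all_eq_true.mp h) k (List.mem_range.mpr hk)
    have hceq : seq2.getD (e (k / s) (k % s)) 0 = seq.getD k 0 := by simpa using hc
    simp only [List.getElem_map, List.getElem_range]
    rw [hceq, List.getD_eq_getElem seq 0 h1]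
  · intro h
    rw [List.all_eq_true]
    intro k hk
    simp only [List.mem_range] at hk
    simp only [beq_iff_eq]
    have hmap : (List.map (fun k => seq2.getD (e (k / s) (k % s)) 0) (List.range (s * s))).getD k 0
        = seq2.getD (e (k / s) (k % s)) 0 := by
      rw [List.getD_eq_getElem _ 0 (by simpa using hk)]
      simp
    rw [h, hmap]

-- length of the canonical transform
theorem pvCanon_length (seq2 : List Int) (s : Nat) (e : Nat → Nat → Nat) :
    (pvCanon seq2 s e).length = s * s := by
  simp [pvCanon_eq_map]

theorem pvRangeRev' (s : Nat) :
    PySem.List.pyRange ((s : Int) - 1) (-1) (-1)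
      = (List.range s).map (fun k => ((s - 1 - k : Nat) : Int)) := by
  rw [PySem.List.pyRange_neg_one]
  have hh : ((s : Int) - 1 - (-1)).toNat = s := by omega
  rw [hh]
  apply List.map_congr_left
  intro k hk
  simp only [List.mem_range] at hk
  omega

-- ===== VERDICT (by name: the statement is the Claim_ definition above) =====
theorem is_same_square_array_spec : Claim_equal_is_same_square_array := by
  intro seq seq2 _hd hpre
  unfold Spec_is_same_square_array
  by_cases hss : seq = seq2
  · simp [is_same_square_array, is_same_square_array_alt, hss]
  · rcases hpre with h | h2
    · exact absurd h hss
    set s := pvIsqrt seq.length with hs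
    have hsq : s = Nat.sqrt seq.length := by rw [hs, pvIsqrt_eq]
    have hs0 : 0 < s := by
      rcases Nat.eq_zero_or_pos s with h0 | h0
      · exfalso
        have hlen0 : seq.length = 0 := by
          have h1 := Nat.sqrt_pos (n := seq.length)
          rw [← hsq] at h1
          omega
        have h20 : seq2.length = 0 := by rw [h2, h0]
        exact hss (by
          rw [List.length_eq_zero_iff.mp hlen0, List.length_eq_zero_iff.mp h20])
      · exact h0
    have hra : PySem.List.pyRange 0 (s : Int) 1 = (List.range s).map (fun k => ((k : Nat) : Int)) := by
      rw [PySem.List.pyRange_one]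
      simp
    have hrd := pvRangeRev' s
    have hA1 : pyReorder? seq2 (((List.range s).map (fun k => ((s - 1 - k : Nat) : Int))).flatMap
          (fun i => ((List.range s).map (fun k => ((k : Nat) : Int))).map (fun j => i * (s : Int) + j)))
        = some (pvCanon seq2 s (fun i j => (s - 1 - i) * s + j)) :=
      pvReorder_eval seq2 s h2 (fun k => s - 1 - k) (fun k => k) (fun k hk => by show s - 1 - k < s; omega) (fun k hk => hk)
        (fun i j => i * (s : Int) + j) (fun i j => i * s + j) (fun i j _ _ => by push_cast; ring)
    have hA2 : pyReorder? seq2 (((List.range s).map (fun k => ((k : Nat) : Int))).flatMap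
          (fun i => ((List.range s).map (fun k => ((s - 1 - k : Nat) : Int))).map (fun j => i * (s : Int) + j)))
        = some (pvCanon seq2 s (fun i j => i * s + (s - 1 - j))) :=
      pvReorder_eval seq2 s h2 (fun k => k) (fun k => s - 1 - k) (fun k hk => hk) (fun k hk => by show s - 1 - k < s; omega)
        (fun i j => i * (s : Int) + j) (fun i j => i * s + j) (fun i j _ _ => by push_cast; ring)
    have hA3 : pyReorder? seq2 (((List.range s).map (fun k => ((s - 1 - k : Nat) : Int))).flatMap
          (fun i => ((List.range s).map (fun k => ((s - 1 - k : Nat) : Int))).map (fun j => i * (s : Int) + j)))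
        = some (pvCanon seq2 s (fun i j => (s - 1 - i) * s + (s - 1 - j))) :=
      pvReorder_eval seq2 s h2 (fun k => s - 1 - k) (fun k => s - 1 - k) (fun k hk => by show s - 1 - k < s; omega) (fun k hk => by show s - 1 - k < s; omega)
        (fun i j => i * (s : Int) + j) (fun i j => i * s + j) (fun i j _ _ => by push_cast; ring)
    have hA4 : pyReorder? seq2 (((List.range s).map (fun k => ((k : Nat) : Int))).flatMap
          (fun i => ((List.range s).map (fun k => ((k : Nat) : Int))).map (fun j => j * (s : Int) + i)))
        = some (pvCanon seq2 s (fun i j => j * s + i)) :=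
      pvReorder_eval seq2 s h2 (fun k => k) (fun k => k) (fun k hk => hk) (fun k hk => hk)
        (fun i j => j * (s : Int) + i) (fun i j => j * s + i) (fun i j _ _ => by push_cast; ring)
    have hA5 : pyReorder? seq2 (((List.range s).map (fun k => ((s - 1 - k : Nat) : Int))).flatMap
          (fun i => ((List.range s).map (fun k => ((k : Nat) : Int))).map (fun j => j * (s : Int) + i)))
        = some (pvCanon seq2 s (fun i j => j * s + (s - 1 - i))) :=
      pvReorder_eval seq2 s h2 (fun k => s - 1 - k) (fun k => k) (fun k hk => by show s - 1 - k < s; omega) (fun k hk => hk)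
        (fun i j => j * (s : Int) + i) (fun i j => j * s + i) (fun i j _ _ => by push_cast; ring)
    have hA6 : pyReorder? seq2 (((List.range s).map (fun k => ((k : Nat) : Int))).flatMap
          (fun i => ((List.range s).map (fun k => ((s - 1 - k : Nat) : Int))).map (fun j => j * (s : Int) + i)))
        = some (pvCanon seq2 s (fun i j => (s - 1 - j) * s + i)) :=
      pvReorder_eval seq2 s h2 (fun k => k) (fun k => s - 1 - k) (fun k hk => hk) (fun k hk => by show s - 1 - k < s; omega)
        (fun i j => j * (s : Int) + i) (fun i j => j * s + i) (fun i j _ _ => by push_cast; ring)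
    have hA7 : pyReorder? seq2 (((List.range s).map (fun k => ((s - 1 - k : Nat) : Int))).flatMap
          (fun i => ((List.range s).map (fun k => ((s - 1 - k : Nat) : Int))).map (fun j => j * (s : Int) + i)))
        = some (pvCanon seq2 s (fun i j => (s - 1 - j) * s + (s - 1 - i))) :=
      pvReorder_eval seq2 s h2 (fun k => s - 1 - k) (fun k => s - 1 - k) (fun k hk => by show s - 1 - k < s; omega) (fun k hk => by show s - 1 - k < s; omega)
        (fun i j => j * (s : Int) + i) (fun i j => j * s + i) (fun i j _ _ => by push_cast; ring)
    simp only [is_same_square_array]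
    rw [hrd, hra, hA1, hA2, hA3, hA4, hA5, hA6, hA7]
    simp only [Option.some.injEq]
    by_cases hl : seq.length = s * s
    · -- main case: both sides decided by the same seven canonical comparisons
      have halt : is_same_square_array_alt seq seq2
          = if ([0, 1, 2, 3, 4, 5, 6] : List Nat).filter (fun t => (List.range (s * s)).all
              (fun k => seq2.getD (bMap s (s - 1) t (k / s) (k % s)) 0 == seq.getD k 0)) = []
            then -1 else 0 := by
        rw [is_same_square_array_alt, if_neg hss, ← hs, if_neg (not_not_intro h2),
          if_neg (not_not_intro hl), pvBLoop_eval seq seq2 s _ _ (by simp)]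
      rw [halt]
      have e0 : (fun i j => bMap s (s - 1) 0 i j) = (fun i j : Nat => (s - 1 - i) * s + j) := by
        funext i j; simp [bMap]
      have e1 : (fun i j => bMap s (s - 1) 1 i j) = (fun i j : Nat => i * s + (s - 1 - j)) := by
        funext i j; simp [bMap]
      have e2 : (fun i j => bMap s (s - 1) 2 i j) = (fun i j : Nat => (s - 1 - i) * s + (s - 1 - j)) := by
        funext i j; simp [bMap]
      have e3 : (fun i j => bMap s (s - 1) 3 i j) = (fun i j : Nat => j * s + i) := by
        funext i j; simp [bMap]
      have e4 : (fun i j => bMap s (s - 1) 4 i j) = (fun i j : Nat => j * s + (s - 1 - i)) := by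
        funext i j; simp [bMap]
      have e5 : (fun i j => bMap s (s - 1) 5 i j) = (fun i j : Nat => (s - 1 - j) * s + i) := by
        funext i j; simp [bMap]
      have e6 : (fun i j => bMap s (s - 1) 6 i j) = (fun i j : Nat => (s - 1 - j) * s + (s - 1 - i)) := by
        funext i j; simp [bMap]
      have key : (seq = seq2 ∨ seq = pvCanon seq2 s (fun i j => (s - 1 - i) * s + j) ∨
            seq = pvCanon seq2 s (fun i j => i * s + (s - 1 - j)) ∨
            seq = pvCanon seq2 s (fun i j => (s - 1 - i) * s + (s - 1 - j)) ∨
            seq = pvCanon seq2 s (fun i j => j * s + i) ∨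
            seq = pvCanon seq2 s (fun i j => j * s + (s - 1 - i)) ∨
            seq = pvCanon seq2 s (fun i j => (s - 1 - j) * s + i) ∨
            seq = pvCanon seq2 s (fun i j => (s - 1 - j) * s + (s - 1 - i)))
          ↔ ¬ (([0, 1, 2, 3, 4, 5, 6] : List Nat).filter (fun t => (List.range (s * s)).all
              (fun k => seq2.getD (bMap s (s - 1) t (k / s) (k % s)) 0 == seq.getD k 0)) = []) := by
        rw [← List.isEmpty_iff, Bool.not_eq_true, List.isEmpty_eq_false_iff_exists_mem]
        constructor
        · rintro (h | h | h | h | h | h | h | h)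
          · exact absurd h hss
          · exact ⟨0, List.mem_filter.mpr ⟨by simp, (pvAll_iff_canon seq seq2 s hl (fun i j => bMap s (s - 1) 0 i j)).mpr (e0.symm ▸ h)⟩⟩
          · exact ⟨1, List.mem_filter.mpr ⟨by simp, (pvAll_iff_canon seq seq2 s hl (fun i j => bMap s (s - 1) 1 i j)).mpr (e1.symm ▸ h)⟩⟩
          · exact ⟨2, List.mem_filter.mpr ⟨by simp, (pvAll_iff_canon seq seq2 s hl (fun i j => bMap s (s - 1) 2 i j)).mpr (e2.symm ▸ h)⟩⟩
          · exact ⟨3, List.mem_filter.mpr ⟨by simp, (pvAll_iff_canon seq seq2 s hl (fun i j => bMap s (s - 1) 3 i j)).mpr (e3.symm ▸ h)⟩⟩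
          · exact ⟨4, List.mem_filter.mpr ⟨by simp, (pvAll_iff_canon seq seq2 s hl (fun i j => bMap s (s - 1) 4 i j)).mpr (e4.symm ▸ h)⟩⟩
          · exact ⟨5, List.mem_filter.mpr ⟨by simp, (pvAll_iff_canon seq seq2 s hl (fun i j => bMap s (s - 1) 5 i j)).mpr (e5.symm ▸ h)⟩⟩
          · exact ⟨6, List.mem_filter.mpr ⟨by simp, (pvAll_iff_canon seq seq2 s hl (fun i j => bMap s (s - 1) 6 i j)).mpr (e6.symm ▸ h)⟩⟩
        · rintro ⟨t, ht⟩
          rw [List.mem_filter] at ht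
          obtain ⟨htmem, htall⟩ := ht
          have := (pvAll_iff_canon seq seq2 s hl (fun i j => bMap s (s - 1) t i j)).mp htall
          fin_cases htmem
          · exact Or.inr (Or.inl (e0 ▸ this))
          · exact Or.inr (Or.inr (Or.inl (e1 ▸ this)))
          · exact Or.inr (Or.inr (Or.inr (Or.inl (e2 ▸ this))))
          · exact Or.inr (Or.inr (Or.inr (Or.inr (Or.inl (e3 ▸ this)))))
          · exact Or.inr (Or.inr (Or.inr (Or.inr (Or.inr (Or.inl (e4 ▸ this))))))
          · exact Or.inr (Or.inr (Or.inr (Or.inr (Or.inr (Or.inr (Or.inl (e5 ▸ this)))))))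
          · exact Or.inr (Or.inr (Or.inr (Or.inr (Or.inr (Or.inr (Or.inr (e6 ▸ this)))))))
      by_cases hF : ([0, 1, 2, 3, 4, 5, 6] : List Nat).filter (fun t => (List.range (s * s)).all
          (fun k => seq2.getD (bMap s (s - 1) t (k / s) (k % s)) 0 == seq.getD k 0)) = []
      · rw [if_pos hF, if_neg (fun hc => (key.mp hc) hF)]
      · rw [if_neg hF, if_pos (key.mpr hF)]
    · -- length mismatch: every canonical comparison fails, both sides return -1
      have hne : ∀ e : Nat → Nat → Nat, seq ≠ pvCanon seq2 s e := by
        intro e hc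
        exact hl (by rw [hc, pvCanon_length])
      rw [if_neg (by
        rintro (h | h | h | h | h | h | h | h)
        · exact hss h
        all_goals exact hne _ h)]
      rw [is_same_square_array_alt, if_neg hss, ← hs, if_neg (not_not_intro h2), if_pos hl]
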